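-- pv_equiv track=rewrite | github.com/swaston-generators/swaston-py | src/swaston_generator.py | generate_swaston
-- ===== SOURCE A (Python) =====
-- def generate_swaston(s):
--     if len(s) < 2:
--         return s
--     l_spaced_word = " ".join(s)
--     r_spaced_word = " ".join(s)[::-1]
--     l_word = s[::-1]
--     r_word = s
--     center = "{0}{1}\n".format(l_spaced_word, r_spaced_word[1:])
--     tab_pre = " " * (len(r_spaced_word) - 2)
--     tab_post = tab_pre + " "
--     upper, lower = [], []
--     size = len(l_word)
--     for c in range(size - 1):
--         if c == 0:
--             upper.append("{0}{1}{2}\n".format(l_word[c], tab_pre, l_spaced_word))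
--         else:
--             upper.append("{0}{1}{2}{3}\n".format(l_word[c], tab_pre, r_word[c], tab_post))
--
--     for c in range(1, size):
--         if c == size - 1:
--             lower.append("{0}{1}{2}\n".format(r_spaced_word, tab_pre, r_word[c]))
--         else:
--             lower.append("{0}{1}{2}{3}\n".format(tab_post, l_word[c], tab_pre, r_word[c]))
--
--     return "{0}{1}{2}".format("".join(upper), center, "".join(lower))
-- ===== SOURCE B (Python) =====
-- def generate_swaston(s):
--     n = len(s)
--     if n < 2:
--         return s
--     spaced = " ".join(s)
--     pre = " " * (2 * n - 3)
--     post = " " * (2 * n - 2)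
--     # top half only: first arm row, the inner arm rows, then the center row
--     rows = [s[n - 1] + pre + spaced]
--     for c in range(1, n - 1):
--         rows.append(s[n - 1 - c] + pre + s[c] + post)
--     rows.append(spaced + spaced[:-1][::-1])
--     # the figure is symmetric under 180-degree rotation: the bottom half is
--     # the top half (without the center) reversed row-wise and character-wise
--     all_rows = rows + [r[::-1] for r in reversed(rows[:-1])]
--     return "".join(r + "\n" for r in all_rows)
-- ===== Notes on version B (the rewrite author's own statement) =====
-- stated objective: alternative
-- what changed: B computes only the top half of the figure (first arm row, inner arm rows, center) and derives the whole bottom half from the figure's 180-degree rotational symmetry by reversing the top rows row-wise and character-wise, instead of A's second loop with its own per-row format strings.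
import Mathlib
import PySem

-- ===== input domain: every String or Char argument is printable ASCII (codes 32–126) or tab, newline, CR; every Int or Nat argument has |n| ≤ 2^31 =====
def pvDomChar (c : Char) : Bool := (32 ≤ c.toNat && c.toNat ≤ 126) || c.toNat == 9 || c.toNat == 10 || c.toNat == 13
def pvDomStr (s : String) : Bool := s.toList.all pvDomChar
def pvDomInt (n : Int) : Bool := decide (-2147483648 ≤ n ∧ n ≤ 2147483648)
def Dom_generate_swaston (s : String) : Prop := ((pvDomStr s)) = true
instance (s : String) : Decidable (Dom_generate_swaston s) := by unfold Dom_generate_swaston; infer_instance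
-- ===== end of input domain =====

-- B builds only the top half of the figure and obtains the bottom half by the
-- figure's 180-degree rotational symmetry (rows reversed row-wise and character-wise):
-- objective 'alternative' (no speed claim).

-- ===== PORT A =====
-- Literal port of A.  String indexing l_word[c]/r_word[c] is always in range
-- (c < size = len(s)), so it is ported as List.getD with an unreachable default;
-- " " * (len(r_spaced) - 2) has len(r_spaced) ≥ 3 here, so Nat subtraction is exact.
def generate_swaston (s : String) : String :=
  if PySem.Str.len s < 2 then s else
    let cs := s.toList
    let l_spaced := PySem.Chars.join [' '] (cs.map (fun c => [c]))
    let r_spaced := (PySem.List.slice? (PySem.Chars.join [' '] (cs.map (fun c => [c]))) none none (-1)).getD []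
    let l_word := (PySem.List.slice? cs none none (-1)).getD []
    let r_word := cs
    let center := l_spaced ++ PySem.List.slice r_spaced (some 1) none ++ ['\n']
    let tab_pre := List.replicate (r_spaced.length - 2) ' '
    let tab_post := tab_pre ++ [' ']
    let size := l_word.length
    let upper := (List.range (size - 1)).map (fun c =>
      if c = 0 then l_word.getD c ' ' :: (tab_pre ++ l_spaced ++ ['\n'])
      else l_word.getD c ' ' :: (tab_pre ++ [r_word.getD c ' '] ++ tab_post ++ ['\n']))
    let lower := (List.range (size - 1)).map (fun i =>
      let c := i + 1
      if c = size - 1 then r_spaced ++ tab_pre ++ [r_word.getD c ' '] ++ ['\n']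
      else tab_post ++ [l_word.getD c ' '] ++ tab_pre ++ [r_word.getD c ' '] ++ ['\n'])
    String.ofList (upper.flatten ++ center ++ lower.flatten)

-- ===== PORT B =====
-- Literal port of Source B.  Indexing s[...] is always in range (indices < n), so it is
-- ported as List.getD; " " * (2*n - 3) and " " * (2*n - 2) have n ≥ 2, so Nat
-- subtraction is exact.  spaced[:-1][::-1] and r[::-1] are ported with PySem slices.
def generate_swaston_alt (s : String) : String :=
  if PySem.Str.len s < 2 then s else
    let cs := s.toList
    let n := cs.length
    let spaced := PySem.Chars.join [' '] (cs.map (fun c => [c]))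
    let pre := List.replicate (2 * n - 3) ' '
    let post := List.replicate (2 * n - 2) ' '
    let rows :=
      (cs.getD (n - 1) ' ' :: (pre ++ spaced))
        :: ((List.range (n - 2)).map (fun i =>
              let c := i + 1
              cs.getD (n - 1 - c) ' ' :: (pre ++ [cs.getD c ' '] ++ post))
            ++ [spaced ++ (PySem.List.slice? (PySem.List.slice spaced none (some (-1))) none none (-1)).getD []])
    let all_rows := rows ++ (rows.dropLast).reverse.map (fun r => (PySem.List.slice? r none none (-1)).getD [])
    String.ofList ((all_rows.map (fun r => r ++ ['\n'])).flatten)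

-- ===== PRECONDITION & SPEC =====
def Spec_generate_swaston (s : String) (out : String) : Prop := out = generate_swaston_alt s
instance (s : String) (out : String) : Decidable (Spec_generate_swaston s out) := by unfold Spec_generate_swaston; infer_instance

-- ===== CLAIM (what is proved, stated in full; the proofs are below) =====
def Claim_equal_generate_swaston : Prop := ∀ (s : String), Dom_generate_swaston s → Spec_generate_swaston s (generate_swaston s)

-- ===== LEMMAS AND PROOFS =====

theorem pv_join_len (cs : List Char) (h : cs ≠ []) :
    (PySem.Chars.join [' '] (cs.map (fun c => [c]))).length = 2 * cs.length - 1 := by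
  match cs, h with
  | a :: t, _ => ?_
  induction t generalizing a with
  | nil => simp [PySem.Chars.join_singleton]
  | cons b t ih =>
    simp only [List.map_cons, PySem.Chars.join_cons_cons]
    have := ih b
    simp only [List.map_cons] at this
    simp [this]
    omega

theorem pv_getD_reverse (cs : List Char) (i : Nat) (h : i < cs.length) (d : Char) :
    cs.reverse.getD i d = cs.getD (cs.length - 1 - i) d := by
  have h1 : i < cs.reverse.length := by simpa using h
  have h2 : cs.length - 1 - i < cs.length := by omega
  rw [List.getD_eq_getElem?_getD, List.getD_eq_getElem?_getD,
    List.getElem?_eq_getElem h1, List.getElem?_eq_getElem h2]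
  simp [List.getElem_reverse]

theorem pv_map_range_reverse {α : Type} (m : Nat) (g : Nat → α) :
    (List.map g (List.range m)).reverse = List.map (fun i => g (m - 1 - i)) (List.range m) := by
  apply List.ext_getElem
  · simp
  intro i h1 h2
  simp at h1
  simp [List.getElem_reverse]

theorem pv_dropLast_cons_concat {α : Type} (a : α) (l : List α) (b : α) :
    (a :: (l ++ [b])).dropLast = a :: l := by
  rw [List.dropLast_cons_of_ne_nil (by simp)]
  simp

theorem pv_replicate_shift {α : Type} (m : Nat) (a : α) (l : List α) :
    List.replicate m a ++ a :: l = a :: (List.replicate m a ++ l) := by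
  induction m with
  | zero => rfl
  | succ k ih => simp [List.replicate_succ, ih]

theorem pv_core (cs j : List Char) (hn : 2 ≤ cs.length)
    (hlen : j.length = 2 * cs.length - 1) :
    (List.map
        (fun c =>
          if c = 0 then cs.reverse.getD c ' ' :: (List.replicate (j.length - 2) ' ' ++ j ++ ['\n'])
          else
            cs.reverse.getD c ' ' ::
              (List.replicate (j.length - 2) ' ' ++ [cs.getD c ' '] ++
                  (List.replicate (j.length - 2) ' ' ++ [' ']) ++
                ['\n']))
        (List.range (cs.length - 1))).flatten ++
      (j ++ j.dropLast.reverse ++ ['\n']) ++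
      (List.map
          (fun i =>
            if i + 1 = cs.length - 1 then j.reverse ++ List.replicate (j.length - 2) ' ' ++ [cs.getD (i + 1) ' '] ++ ['\n']
            else
              List.replicate (j.length - 2) ' ' ++ [' '] ++ [cs.reverse.getD (i + 1) ' '] ++
                    List.replicate (j.length - 2) ' ' ++
                  [cs.getD (i + 1) ' '] ++
                ['\n'])
          (List.range (cs.length - 1))).flatten =
    (List.map (fun r => r ++ ['\n'])
        (((cs.getD (cs.length - 1) ' ' :: (List.replicate (2 * cs.length - 3) ' ' ++ j)) ::
            (List.map
                (fun i =>
                  cs.getD (cs.length - 1 - (i + 1)) ' ' ::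
                    (List.replicate (2 * cs.length - 3) ' ' ++ [cs.getD (i + 1) ' '] ++ List.replicate (2 * cs.length - 2) ' '))
                (List.range (cs.length - 2)) ++
              [j ++ j.dropLast.reverse]) ++
          List.map (fun r => r.reverse)
            ((cs.getD (cs.length - 1) ' ' :: (List.replicate (2 * cs.length - 3) ' ' ++ j)) ::
                  (List.map
                      (fun i =>
                        cs.getD (cs.length - 1 - (i + 1)) ' ' ::
                          (List.replicate (2 * cs.length - 3) ' ' ++ [cs.getD (i + 1) ' '] ++ List.replicate (2 * cs.length - 2) ' '))
                      (List.range (cs.length - 2)) ++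
                    [j ++ j.dropLast.reverse])).dropLast.reverse))).flatten := by
  set n := cs.length with hnn
  have e2 : j.length - 2 = 2 * n - 3 := by omega
  have hm1 : n - 1 = (n - 2) + 1 := by omega
  rw [e2, hm1]
  -- B side: compute dropLast / reverse of the row list, push map inside
  rw [pv_dropLast_cons_concat]
  simp only [List.reverse_cons, List.map_append, List.map_cons, List.map_nil,
    List.flatten_append, List.flatten_cons, List.flatten_nil, List.map_map]
  -- A side: split the two ranges
  nth_rewrite 1 [List.range_succ_eq_map]
  rw [List.range_succ]
  simp only [List.map_append, List.map_cons, List.map_nil, List.map_map,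
    List.flatten_append, List.flatten_cons, List.flatten_nil]
  simp only [if_true, List.append_nil, Function.comp_def]
  rw [pv_map_range_reverse]
  simp only [List.map_map, Function.comp_def]
  have epost : List.replicate (2 * n - 2) ' ' = List.replicate (2 * n - 3) ' ' ++ [' '] := by
    rw [← List.replicate_succ']
    congr 1
    omega
  have hgd0 : cs.reverse.getD 0 ' ' = cs.getD (n - 2 + 1) ' ' := by
    rw [pv_getD_reverse cs 0 (by omega)]
    congr 1
  have hU : ∀ i ∈ List.range (n - 2),
      (if i + 1 = 0 then cs.reverse.getD (i + 1) ' ' :: (List.replicate (2 * n - 3) ' ' ++ j ++ ['\n'])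
       else cs.reverse.getD (i + 1) ' ' ::
         (List.replicate (2 * n - 3) ' ' ++ [cs.getD (i + 1) ' '] ++ (List.replicate (2 * n - 3) ' ' ++ [' ']) ++ ['\n']))
      = (cs.getD (n - 2 + 1 - (i + 1)) ' ' ::
          (List.replicate (2 * n - 3) ' ' ++ [cs.getD (i + 1) ' '] ++ List.replicate (2 * n - 2) ' ')) ++ ['\n'] := by
    intro i hi
    rw [List.mem_range] at hi
    rw [if_neg (by omega), epost, pv_getD_reverse cs (i + 1) (by omega)]
    have : n - 1 - (i + 1) = n - 2 + 1 - (i + 1) := by omega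
    rw [this]
    simp [List.append_assoc]
  rw [List.map_congr_left hU]
  have hL : ∀ i ∈ List.range (n - 2),
      (if i + 1 = n - 2 + 1 then j.reverse ++ List.replicate (2 * n - 3) ' ' ++ [cs.getD (i + 1) ' '] ++ ['\n']
       else
        List.replicate (2 * n - 3) ' ' ++ [' '] ++ [cs.reverse.getD (i + 1) ' '] ++
          List.replicate (2 * n - 3) ' ' ++ [cs.getD (i + 1) ' '] ++ ['\n'])
      = (cs.getD (n - 2 + 1 - (n - 2 - 1 - i + 1)) ' ' ::
          (List.replicate (2 * n - 3) ' ' ++ [cs.getD (n - 2 - 1 - i + 1) ' '] ++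
            List.replicate (2 * n - 2) ' ')).reverse ++ ['\n'] := by
    intro i hi
    rw [List.mem_range] at hi
    rw [if_neg (by omega), pv_getD_reverse cs (i + 1) (by omega)]
    have e3 : n - 2 + 1 - (n - 2 - 1 - i + 1) = i + 1 := by omega
    have e4 : n - 2 - 1 - i + 1 = n - 1 - (i + 1) := by omega
    rw [e3, e4, epost]
    simp [List.append_assoc, pv_replicate_shift, ← hnn]
  rw [List.map_congr_left hL, hgd0]
  simp [List.append_assoc]


theorem generate_swaston_main (s : String) (h : ¬ PySem.Str.len s < 2) :
    generate_swaston s = generate_swaston_alt s := by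
  have hn : 2 ≤ s.toList.length := by
    simp [PySem.Str.len, - String.length_toList] at h
    omega
  unfold generate_swaston generate_swaston_alt
  rw [if_neg h, if_neg h]
  simp only [PySem.List.slice?_none_none_neg_one, Option.getD_some, PySem.List.slice_from_one,
    PySem.List.slice_to_neg_one, List.length_reverse, List.tail_reverse]
  generalize s.toList = cs at hn ⊢
  have hlen : (PySem.Chars.join [' '] (cs.map (fun c => [c]))).length = 2 * cs.length - 1 :=
    pv_join_len cs (by intro hx; rw [hx] at hn; simp at hn)
  generalize hjj : PySem.Chars.join [' '] (cs.map (fun c => [c])) = j at hlen ⊢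
  exact congrArg String.ofList (pv_core cs j hn hlen)

-- ===== VERDICT (by name: the statement is the Claim_ definition above) =====
theorem generate_swaston_spec : Claim_equal_generate_swaston := by
  intro s _
  unfold Spec_generate_swaston
  by_cases h : PySem.Str.len s < 2
  · unfold generate_swaston generate_swaston_alt
    rw [if_pos h, if_pos h]
  · exact generate_swaston_main s h
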